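-- pv_equiv track=rewrite | github.com/ManasHarbola/EPI_solutions | Chapter6/6-11.py | snake_string
-- ===== SOURCE A (Python) =====
-- def snake_string(s):
--     lst = []
--     for i in range(1, len(s), 4):
--         lst.append(s[i])
--     for i in range(0, len(s), 2):
--         lst.append(s[i])
--     for i in range(3, len(s), 4):
--         lst.append(s[i])
--
--     return ''.join(lst)
-- ===== SOURCE B (Python) =====
-- def snake_string(s):
--     top, mid, bot = [], [], []
--     for i, c in enumerate(s):
--         r = i % 4
--         if r == 1:
--             top.append(c)
--         elif r == 3:
--             bot.append(c)
--         else: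
--             mid.append(c)
--     return ''.join(top + mid + bot)
-- ===== Notes on version B (the rewrite author's own statement) =====
-- stated objective: alternative
-- what changed: One enumerate pass distributing each character into top/middle/bottom buckets by i % 4, replacing A's three separate range-stepped scans over the string.
import Mathlib
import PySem

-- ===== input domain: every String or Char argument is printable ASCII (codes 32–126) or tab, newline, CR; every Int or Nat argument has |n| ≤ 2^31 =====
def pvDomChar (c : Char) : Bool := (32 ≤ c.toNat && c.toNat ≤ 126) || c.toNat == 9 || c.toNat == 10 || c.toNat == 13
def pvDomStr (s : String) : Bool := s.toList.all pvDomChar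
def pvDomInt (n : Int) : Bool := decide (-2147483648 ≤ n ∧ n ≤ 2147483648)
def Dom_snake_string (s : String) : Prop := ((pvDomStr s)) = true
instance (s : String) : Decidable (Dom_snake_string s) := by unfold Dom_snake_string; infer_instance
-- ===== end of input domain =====

-- B replaces A's three range-stepped scans by one enumerate pass into three buckets (same cost, different decomposition); the return values are proved equal on all strings.

-- ===== PORT A =====
-- loop body 'lst.append(s[i])' (s[i] is always in range here, so the none branch of pyGet? is unreachable)
def snakeStep (s : String) (acc : List Char) (i : Int) : List Char :=
  acc ++ (PySem.Str.pyGet? s i).toList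

def snake_string (s : String) : String :=
  let lst := (PySem.List.pyRange 1 (PySem.Str.len s) 4).foldl (snakeStep s) []
  let lst := (PySem.List.pyRange 0 (PySem.Str.len s) 2).foldl (snakeStep s) lst
  let lst := (PySem.List.pyRange 3 (PySem.Str.len s) 4).foldl (snakeStep s) lst
  String.mk lst

-- ===== PORT B =====
def snakeBucket (acc : List Char × List Char × List Char) (ic : Int × Char) :
    List Char × List Char × List Char :=
  let r := PySem.Int.mod ic.1 4
  if r = 1 then (acc.1 ++ [ic.2], acc.2.1, acc.2.2)
  else if r = 3 then (acc.1, acc.2.1, acc.2.2 ++ [ic.2])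
  else (acc.1, acc.2.1 ++ [ic.2], acc.2.2)

def snake_string_alt (s : String) : String :=
  let b := (PySem.List.enumerate s.toList).foldl snakeBucket ([], [], [])
  String.mk (b.1 ++ (b.2.1 ++ b.2.2))

-- ===== PRECONDITION & SPEC =====
def Spec_snake_string (s : String) (out : String) : Prop := out = snake_string_alt s
instance (s : String) (out : String) : Decidable (Spec_snake_string s out) := by unfold Spec_snake_string; infer_instance

-- ===== CLAIM (what is proved, stated in full; the proofs are below) =====
def Claim_equal_snake_string : Prop := ∀ (s : String), Dom_snake_string s → Spec_snake_string s (snake_string s)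

-- ===== LEMMAS AND PROOFS =====

-- the three index buckets, as filterMaps over range n
def pvTop (f : Nat → Char) (n : Nat) : List Char :=
  (List.range n).filterMap (fun j => if j % 4 = 1 then some (f j) else none)
def pvMid (f : Nat → Char) (n : Nat) : List Char :=
  (List.range n).filterMap (fun j => if j % 4 = 1 then none else if j % 4 = 3 then none else some (f j))
def pvBot (f : Nat → Char) (n : Nat) : List Char :=
  (List.range n).filterMap (fun j => if j % 4 = 1 then none else if j % 4 = 3 then some (f j) else none)

lemma pick1 (f : Nat → Char) : ∀ n, (List.range ((n+2)/4)).map (fun k => f (1+4*k)) = pvTop f n := by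
  intro n
  induction n with
  | zero => simp [pvTop]
  | succ n ih =>
    unfold pvTop at *
    rw [List.range_succ, List.filterMap_append, ← ih]
    by_cases h : n % 4 = 1
    · have h4 : (n+1+2)/4 = (n+2)/4 + 1 := by omega
      have h5 : 1+4*((n+2)/4) = n := by omega
      rw [h4, List.range_succ, List.map_append]
      simp [h, h5]
    · have h4 : (n+1+2)/4 = (n+2)/4 := by omega
      rw [h4]; simp [h]

lemma pick_even (f : Nat → Char) : ∀ n, (List.range ((n+1)/2)).map (fun k => f (2*k)) = pvMid f n := by
  intro n
  induction n with
  | zero => simp [pvMid]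
  | succ n ih =>
    unfold pvMid at *
    rw [List.range_succ, List.filterMap_append, ← ih]
    by_cases h : n % 2 = 0
    · have h1 : ¬ n % 4 = 1 := by omega
      have h3 : ¬ n % 4 = 3 := by omega
      have h4 : (n+1+1)/2 = (n+1)/2 + 1 := by omega
      have h5 : 2*((n+1)/2) = n := by omega
      rw [h4, List.range_succ, List.map_append]
      simp [h1, h3, h5]
    · have h13 : n % 4 = 1 ∨ n % 4 = 3 := by omega
      have h4 : (n+1+1)/2 = (n+1)/2 := by omega
      rw [h4]
      rcases h13 with h | h <;> simp [h]

lemma pick3 (f : Nat → Char) : ∀ n, (List.range (n/4)).map (fun k => f (3+4*k)) = pvBot f n := by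
  intro n
  induction n with
  | zero => simp [pvBot]
  | succ n ih =>
    unfold pvBot at *
    rw [List.range_succ, List.filterMap_append, ← ih]
    by_cases h : n % 4 = 3
    · have h1 : ¬ n % 4 = 1 := by omega
      have h4 : (n+1)/4 = n/4 + 1 := by omega
      have h5 : 3+4*(n/4) = n := by omega
      rw [h4, List.range_succ, List.map_append]
      simp [h, h5]
    · have h4 : (n+1)/4 = n/4 := by omega
      rw [h4]
      by_cases h1 : n % 4 = 1 <;> simp [h1, h]

lemma flatMap_eq_map_of {α β : Type} (l : List α) (g : α → List β) (f : α → β)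
    (h : ∀ x ∈ l, g x = [f x]) : l.flatMap g = l.map f := by
  induction l with
  | nil => rfl
  | cons x t ih => simp_all [List.flatMap_cons]

-- A's in-range lookups return exactly the character
lemma pyGet?_of_lt (s : String) (j : Nat) (h : j < s.toList.length) :
    PySem.Str.pyGet? s (j : Int) = some (s.toList.getD j default) := by
  have e : PySem.Str.pyGet? s (j : Int) = PySem.List.pyGet? s.toList (j : Int) := rfl
  rw [e, PySem.List.pyGet?_natCast, List.getElem?_eq_getElem h, List.getD_eq_getElem _ _ h]

-- Python's i % 4 is Lean's emod for the positive divisor 4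
lemma pymod4 (a : Int) : PySem.Int.mod a 4 = a % 4 := by
  have e : PySem.Int.mod a 4 = Int.fmod a 4 := rfl
  rw [e, Int.fmod_eq_emod]
  norm_num

-- one segment of A: a fold over pyRange a n st appends the matching characters
lemma segA (s : String) (a st : Int) (hst : 0 < st) (m : Nat)
    (hm : (if a < (s.toList.length : Int) then (((s.toList.length : Int) - a + st - 1)/st).toNat else 0) = m)
    (acc : List Char) :
    (PySem.List.pyRange a (PySem.Str.len s) st).foldl (snakeStep s) acc
      = acc ++ (List.range m).flatMap (fun (k : Nat) => (PySem.Str.pyGet? s (a + st * (k:Int))).toList) := by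
  have hlen : PySem.Str.len s = (s.toList.length : Int) := rfl
  rw [hlen, PySem.List.pyRange_of_pos _ _ hst, hm, List.foldl_map]
  simp only [snakeStep]
  exact PySem.List.foldl_append_eq_flatMap _ _ _

-- B's bucket fold, characterised
lemma bfold : ∀ (l : List (Int × Char)) (t m b : List Char),
    l.foldl snakeBucket (t, m, b) =
      (t ++ l.filterMap (fun p => if p.1 % 4 = 1 then some p.2 else none),
       m ++ l.filterMap (fun p => if p.1 % 4 = 1 then none else if p.1 % 4 = 3 then none else some p.2),
       b ++ l.filterMap (fun p => if p.1 % 4 = 1 then none else if p.1 % 4 = 3 then some p.2 else none)) := by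
  intro l
  induction l with
  | nil => intro t m b; simp
  | cons p rest ih =>
    intro t m b
    simp only [List.foldl_cons, List.filterMap_cons, snakeBucket, pymod4]
    by_cases h1 : p.1 % 4 = 1
    · simp [h1, ih]
    · by_cases h3 : p.1 % 4 = 3 <;> simp [h1, h3, ih]

lemma mainA (s : String) :
    snake_string s = String.mk (pvTop (fun j => s.toList.getD j default) s.toList.length
      ++ (pvMid (fun j => s.toList.getD j default) s.toList.length
      ++ pvBot (fun j => s.toList.getD j default) s.toList.length)) := by
  simp only [snake_string]
  rw [segA s 1 4 (by norm_num) ((s.toList.length+2)/4) (by split <;> omega) [],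
      segA s 0 2 (by norm_num) ((s.toList.length+1)/2) (by split <;> omega) _,
      segA s 3 4 (by norm_num) (s.toList.length/4) (by split <;> omega) _]
  rw [flatMap_eq_map_of _ _ (fun k => s.toList.getD (1+4*k) default) (by
    intro k hk; rw [List.mem_range] at hk
    have hlt : 1+4*k < s.toList.length := by omega
    have hc : ((1:Int) + 4*(k:Int)) = ((1+4*k : Nat) : Int) := by push_cast; ring
    rw [hc, pyGet?_of_lt s _ hlt]; rfl)]
  rw [flatMap_eq_map_of _ _ (fun k => s.toList.getD (2*k) default) (by
    intro k hk; rw [List.mem_range] at hk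
    have hlt : 2*k < s.toList.length := by omega
    have hc : ((0:Int) + 2*(k:Int)) = ((2*k : Nat) : Int) := by push_cast; ring
    rw [hc, pyGet?_of_lt s _ hlt]; rfl)]
  rw [flatMap_eq_map_of _ _ (fun k => s.toList.getD (3+4*k) default) (by
    intro k hk; rw [List.mem_range] at hk
    have hlt : 3+4*k < s.toList.length := by omega
    have hc : ((3:Int) + 4*(k:Int)) = ((3+4*k : Nat) : Int) := by push_cast; ring
    rw [hc, pyGet?_of_lt s _ hlt]; rfl)]
  rw [pick1 (fun j => s.toList.getD j default) s.toList.length,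
      pick_even (fun j => s.toList.getD j default) s.toList.length,
      pick3 (fun j => s.toList.getD j default) s.toList.length]
  simp [List.append_assoc]

lemma mainB (s : String) :
    snake_string_alt s = String.mk (pvTop (fun j => s.toList.getD j default) s.toList.length
      ++ (pvMid (fun j => s.toList.getD j default) s.toList.length
      ++ pvBot (fun j => s.toList.getD j default) s.toList.length)) := by
  simp only [snake_string_alt]
  rw [PySem.List.enumerate_eq_map_pyRange s.toList default,
      show PySem.List.len s.toList = (s.toList.length : Int) from rfl,
      PySem.List.pyRange_zero_natCast, List.map_map, bfold]
  simp only [List.filterMap_map, List.nil_append]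
  congr 1
  have hval : ∀ k : Nat, k < s.toList.length →
      PySem.List.pyGetD s.toList (k : Int) default = s.toList.getD k default := by
    intro k hk
    rw [PySem.List.pyGetD_eq_getElem s.toList default (by positivity) (by exact_mod_cast hk),
        List.getD_eq_getElem _ _ hk]
    simp
  congr 1
  · unfold pvTop
    refine List.filterMap_congr ?_
    intro k hk; rw [List.mem_range] at hk
    simp only [Function.comp_apply, hval k hk]
    by_cases h : (k:Int) % 4 = 1
    · have h' : k % 4 = 1 := by omega
      simp [h, h']
    · have h' : ¬ k % 4 = 1 := by omega
      simp [h, h']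
  congr 1
  · unfold pvMid
    refine List.filterMap_congr ?_
    intro k hk; rw [List.mem_range] at hk
    simp only [Function.comp_apply, hval k hk]
    by_cases h1 : (k:Int) % 4 = 1
    · have h1' : k % 4 = 1 := by omega
      simp [h1, h1']
    · have h1' : ¬ k % 4 = 1 := by omega
      by_cases h3 : (k:Int) % 4 = 3
      · have h3' : k % 4 = 3 := by omega
        simp [h3, h3']
      · have h3' : ¬ k % 4 = 3 := by omega
        simp [h1, h1', h3, h3']
  · unfold pvBot
    refine List.filterMap_congr ?_
    intro k hk; rw [List.mem_range] at hk
    simp only [Function.comp_apply, hval k hk]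
    by_cases h1 : (k:Int) % 4 = 1
    · have h1' : k % 4 = 1 := by omega
      simp [h1, h1']
    · have h1' : ¬ k % 4 = 1 := by omega
      by_cases h3 : (k:Int) % 4 = 3
      · have h3' : k % 4 = 3 := by omega
        simp [h3, h3']
      · have h3' : ¬ k % 4 = 3 := by omega
        simp [h1, h1', h3, h3']

-- ===== VERDICT (by name: the statement is the Claim_ definition above) =====
theorem snake_string_spec : Claim_equal_snake_string := by
  intro s _
  unfold Spec_snake_string
  rw [mainA, mainB]
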